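-- pv_equiv track=rewrite | github.com/vitalij555/JarvisLT | jarvis/connectors/web_crawler.py | _filter_by_topic
-- ===== SOURCE A (Python) =====
-- def _filter_by_topic(markdown: str, topic: str) -> str:
--     """
--     Keep only paragraphs/sections that contain any keyword from topic_filter.
--     Falls back to full text if nothing matches (better than returning nothing).
--     """
--     keywords = [kw.strip().lower() for kw in topic.replace(",", " ").split() if kw.strip()]
--     if not keywords:
--         return markdown
--
--     paragraphs = markdown.split("\n\n")
--     matched = [p for p in paragraphs if any(kw in p.lower() for kw in keywords)]
--
--     if len(matched) < 3:
--         # Too few matches — return full text so the LLM can decide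
--         return markdown
--     return "\n\n".join(matched)
-- ===== SOURCE B (Python) =====
-- def _filter_by_topic(markdown: str, topic: str) -> str:
--     keywords = [kw.strip().lower() for kw in topic.replace(",", " ").split() if kw.strip()]
--     if not keywords:
--         return markdown
--
--     matched = [p for p in markdown.split("\n\n")
--                if _contains_any(p.lower(), keywords)]
--
--     if len(matched) >= 3:
--         return "\n\n".join(matched)
--     return markdown
--
--
-- def _contains_any(text, keywords):
--     # position-major multi-pattern scan: one left-to-right pass over the
--     # paragraph, testing every keyword as a prefix at each position
--     for i in range(len(text) + 1):
--         if any(text.startswith(kw, i) for kw in keywords):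
--             return True
--     return False
-- ===== Notes on version B (the rewrite author's own statement) =====
-- stated objective: alternative
-- what changed: Replaces the keyword-major membership test (a full substring search of the paragraph per keyword) by a single position-major scan: one pass over each lowered paragraph that tests every keyword as a prefix at each position; join/fallback logic unchanged.
import Mathlib
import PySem

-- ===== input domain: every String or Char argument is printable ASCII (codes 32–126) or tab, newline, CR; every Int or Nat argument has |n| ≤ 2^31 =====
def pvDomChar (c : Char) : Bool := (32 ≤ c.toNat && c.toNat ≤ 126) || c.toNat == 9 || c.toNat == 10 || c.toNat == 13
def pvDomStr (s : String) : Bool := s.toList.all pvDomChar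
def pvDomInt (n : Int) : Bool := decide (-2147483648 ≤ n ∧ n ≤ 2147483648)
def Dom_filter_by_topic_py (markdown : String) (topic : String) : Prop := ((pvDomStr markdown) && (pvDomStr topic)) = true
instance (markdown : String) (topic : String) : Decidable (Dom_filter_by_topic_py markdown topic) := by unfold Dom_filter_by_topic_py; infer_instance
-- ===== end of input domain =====

-- B replaces A's per-keyword substring searches by one position-major scan of each
-- lowered paragraph, testing every keyword as a prefix at each position (objective: alternative).

-- ===== PORT A =====
def filter_by_topic_py (markdown : String) (topic : String) : String :=
  let keywords := ((PySem.Str.split₀ (PySem.Str.replace topic "," " ")).filter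
      (fun kw => !(PySem.Str.strip kw == ""))).map (fun kw => PySem.Str.lower (PySem.Str.strip kw))
  if keywords.isEmpty then markdown
  else
    let paragraphs := (PySem.Str.split? markdown "\n\n").getD []
    let matched := paragraphs.filter
        (fun p => keywords.any (fun kw => PySem.Str.isIn kw (PySem.Str.lower p)))
    if matched.length < 3 then markdown
    else PySem.Str.join "\n\n" matched

-- ===== PORT B =====
-- port of _contains_any: for i in range(len(text)+1): if any(text.startswith(kw, i)): return True
-- (the loop over i = the structural recursion over the successive suffixes of the char list)
def pvContainsAny (kws : List (List Char)) : List Char → Bool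
  | [] => kws.any (fun kw => PySem.Chars.startswith [] kw)
  | c :: rest => kws.any (fun kw => PySem.Chars.startswith (c :: rest) kw) || pvContainsAny kws rest

def filter_by_topic_py_alt (markdown : String) (topic : String) : String :=
  let keywords := ((PySem.Str.split₀ (PySem.Str.replace topic "," " ")).filter
      (fun kw => !(PySem.Str.strip kw == ""))).map (fun kw => PySem.Str.lower (PySem.Str.strip kw))
  if keywords.isEmpty then markdown
  else
    let matched := ((PySem.Str.split? markdown "\n\n").getD []).filter
        (fun p => pvContainsAny (keywords.map String.toList) (PySem.Str.lower p).toList)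
    if 3 ≤ matched.length then PySem.Str.join "\n\n" matched
    else markdown

-- ===== PRECONDITION & SPEC =====
def Spec_filter_by_topic_py (markdown : String) (topic : String) (out : String) : Prop := out = filter_by_topic_py_alt markdown topic
instance (markdown : String) (topic : String) (out : String) : Decidable (Spec_filter_by_topic_py markdown topic out) := by unfold Spec_filter_by_topic_py; infer_instance

-- ===== CLAIM (what is proved, stated in full; the proofs are below) =====
def Claim_equal_filter_by_topic_py : Prop := ∀ (markdown : String) (topic : String), Dom_filter_by_topic_py markdown topic → Spec_filter_by_topic_py markdown topic (filter_by_topic_py markdown topic)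

-- ===== LEMMAS AND PROOFS =====

-- the position-major scan finds a keyword iff some keyword is a substring
theorem pvContainsAny_eq_any_isIn (kws : List (List Char)) (t : List Char) :
    pvContainsAny kws t = kws.any (fun kw => PySem.Chars.isIn kw t) := by
  induction t with
  | nil =>
    simp only [pvContainsAny]
    refine List.any_congr rfl (fun kw => ?_)
    rw [Bool.eq_iff_iff, PySem.Chars.startswith_iff, PySem.Chars.isIn_iff_infix]
    constructor
    · intro h; rw [List.prefix_nil] at h; simp [h]
    · intro h; rw [List.infix_nil] at h; simp [h]
  | cons c rest ih =>
    rw [pvContainsAny, ih, Bool.eq_iff_iff]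
    simp only [Bool.or_eq_true, List.any_eq_true]
    simp only [PySem.Chars.startswith_iff, PySem.Chars.isIn_iff_infix, List.infix_cons_iff]
    constructor
    · rintro (⟨x, hx, hp⟩ | ⟨x, hx, hi⟩)
      · exact ⟨x, hx, Or.inl hp⟩
      · exact ⟨x, hx, Or.inr hi⟩
    · rintro ⟨x, hx, hp | hi⟩
      · exact Or.inl ⟨x, hx, hp⟩
      · exact Or.inr ⟨x, hx, hi⟩

theorem pred_eq (kws : List String) (p : String) :
    pvContainsAny (kws.map String.toList) (PySem.Str.lower p).toList
      = kws.any (fun kw => PySem.Str.isIn kw (PySem.Str.lower p)) := by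
  rw [pvContainsAny_eq_any_isIn, List.any_map]
  refine List.any_congr rfl (fun kw => ?_)
  simp [Function.comp, PySem.Str.isIn]

-- ===== VERDICT (by name: the statement is the Claim_ definition above) =====
theorem filter_by_topic_py_spec : Claim_equal_filter_by_topic_py := by
  intro markdown topic _
  unfold Spec_filter_by_topic_py filter_by_topic_py filter_by_topic_py_alt
  simp only []
  set kws := ((PySem.Str.split₀ (PySem.Str.replace topic "," " ")).filter
      (fun kw => !(PySem.Str.strip kw == ""))).map (fun kw => PySem.Str.lower (PySem.Str.strip kw)) with hk
  by_cases h : kws.isEmpty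
  · simp [h]
  · simp only [h, if_false, Bool.false_eq_true]
    have hf : ((PySem.Str.split? markdown "\n\n").getD []).filter
        (fun p => kws.any (fun kw => PySem.Str.isIn kw (PySem.Str.lower p)))
        = ((PySem.Str.split? markdown "\n\n").getD []).filter
        (fun p => pvContainsAny (kws.map String.toList) (PySem.Str.lower p).toList) := by
      refine List.filter_congr (fun p _ => ?_)
      rw [pred_eq]
    rw [hf]
    set m := ((PySem.Str.split? markdown "\n\n").getD []).filter
        (fun p => pvContainsAny (kws.map String.toList) (PySem.Str.lower p).toList)
    rcases Nat.lt_or_ge m.length 3 with hl | hl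
    · rw [if_pos hl, if_neg (by omega)]
    · rw [if_neg (by omega), if_pos hl]
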